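-- pv_equiv track=rewrite | github.com/ksayee/programming_assignments | python/CodingExercises/Indeed-3.py | Indeed
-- ===== SOURCE A (Python) =====
-- def Indeed(logs):
--
--     user_dict = {}
--
--     for lst in logs:
--         user = lst[1]
--         timestamp = lst[0]
--         if user in user_dict.keys():
--             user_dict[user].append(timestamp)
--         else:
--             user_dict[user] = []
--             user_dict[user].append(timestamp)
--
--     for key, val in user_dict.items():
--         temp_lst = sorted(val)
--         user_list = []
--         user_list.append(temp_lst[0])
--         user_list.append(temp_lst[-1])
--         user_dict[key] = user_list
--     return sorted(user_dict.items(), key=lambda x: x[0])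
-- ===== SOURCE B (Python) =====
-- def Indeed(logs):
--     best = {}
--     for lst in logs:
--         ts = lst[0]
--         user = lst[1]
--         if user in best:
--             mn, mx = best[user]
--             best[user] = [ts if ts < mn else mn, ts if mx < ts else mx]
--         else:
--             best[user] = [ts, ts]
--     return sorted(best.items(), key=lambda kv: kv[0])
-- ===== Notes on version B (the rewrite author's own statement) =====
-- stated objective: alternative
-- what changed: B keeps only a running [min,max] pair per user updated in one pass, instead of A's collecting every timestamp per user and then sorting each user's full list in a second pass.
import Mathlib
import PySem

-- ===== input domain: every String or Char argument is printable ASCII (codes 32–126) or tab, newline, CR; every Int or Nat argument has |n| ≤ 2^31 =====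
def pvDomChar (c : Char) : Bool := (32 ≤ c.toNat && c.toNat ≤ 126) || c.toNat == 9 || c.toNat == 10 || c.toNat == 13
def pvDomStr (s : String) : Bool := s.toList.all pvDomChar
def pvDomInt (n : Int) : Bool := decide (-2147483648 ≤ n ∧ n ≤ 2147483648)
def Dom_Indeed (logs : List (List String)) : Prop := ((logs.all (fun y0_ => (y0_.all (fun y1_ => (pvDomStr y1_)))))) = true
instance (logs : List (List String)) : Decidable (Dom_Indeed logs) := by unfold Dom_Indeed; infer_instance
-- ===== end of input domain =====

-- B replaces A's per-user timestamp lists (each sorted in a second pass) by a single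
-- pass keeping a running [min, max] pair per user (objective: alternative algorithm).

-- ===== PORT A =====
-- Literal port of A.  lst[1] / lst[0] are read via pyGet? with `.getD ""`:
-- Pre_Indeed guarantees every row has length ≥ 2, so the default is never taken on admitted inputs.
def Indeed (logs : List (List String)) : List (String × List String) :=
  let d := logs.foldl (fun d lst =>
    let user := (PySem.List.pyGet? lst 1).getD ""
    let ts := (PySem.List.pyGet? lst 0).getD ""
    if d.contains user then
      d.modify user [] (fun v => v ++ [ts])
    else
      (d.insert user []).modify user [] (fun v => v ++ [ts])) PySem.Dict.empty
  let d2 := d.items.foldl (fun d' kv =>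
    let temp_lst := PySem.List.sorted kv.2 (fun x => x) false
    d'.insert kv.1 [(PySem.List.pyGet? temp_lst 0).getD "",
                    (PySem.List.pyGet? temp_lst (-1)).getD ""]) d
  PySem.List.sorted d2.items (fun x => x.1) false

-- ===== PORT B =====
def Indeed_alt (logs : List (List String)) : List (String × List String) :=
  let best := logs.foldl (fun d lst =>
    let ts := (PySem.List.pyGet? lst 0).getD ""
    let user := (PySem.List.pyGet? lst 1).getD ""
    if d.contains user then
      let cur := d.getD user []
      let mn := (PySem.List.pyGet? cur 0).getD ""
      let mx := (PySem.List.pyGet? cur 1).getD ""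
      d.insert user [if ts < mn then ts else mn, if mx < ts then ts else mx]
    else
      d.insert user [ts, ts]) PySem.Dict.empty
  PySem.List.sorted best.items (fun kv => kv.1) false

-- ===== PRECONDITION & SPEC =====
-- Pre_ excludes only rows shorter than 2 fields: on those Python A raises IndexError (lst[1]).
def Pre_Indeed (logs : List (List String)) : Prop := ∀ lst ∈ logs, 2 ≤ lst.length
instance (logs : List (List String)) : Decidable (Pre_Indeed logs) := by unfold Pre_Indeed; infer_instance
def pvWitness_Indeed : List (List String) := [["09:00", "alice"], ["08:30", "bob"], ["10:00", "alice"]]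

def Spec_Indeed (logs : List (List String)) (out : List (String × List String)) : Prop := out = Indeed_alt logs
instance (logs : List (List String)) (out : List (String × List String)) : Decidable (Spec_Indeed logs out) := by unfold Spec_Indeed; infer_instance

-- ===== CLAIM (what is proved, stated in full; the proofs are below) =====
def Claim_equal_Indeed : Prop := ∀ (logs : List (List String)), Dom_Indeed logs → Pre_Indeed logs → Spec_Indeed logs (Indeed logs)

-- ===== LEMMAS AND PROOFS =====

def pvPair (lst : List String) : String × String :=
  ((PySem.List.pyGet? lst 1).getD "", (PySem.List.pyGet? lst 0).getD "")

def tsOf (u : String) (l : List (String × String)) : List String :=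
  (l.filter (fun p => p.1 == u)).map (·.2)

def stepA (d : PySem.Dict String (List String)) (p : String × String) :
    PySem.Dict String (List String) :=
  d.modify p.1 [] (fun v => v ++ [p.2])

def bval (d : PySem.Dict String (List String)) (p : String × String) : List String :=
  if d.contains p.1 then
    let cur := d.getD p.1 []
    let mn := (PySem.List.pyGet? cur 0).getD ""
    let mx := (PySem.List.pyGet? cur 1).getD ""
    [if p.2 < mn then p.2 else mn, if mx < p.2 then p.2 else mx]
  else [p.2, p.2]

def stepB (d : PySem.Dict String (List String)) (p : String × String) :
    PySem.Dict String (List String) :=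
  d.insert p.1 (bval d p)

def runMin (ts : List String) (a : String) : String :=
  ts.foldl (fun a t => if t < a then t else a) a

def runMax (ts : List String) (b : String) : String :=
  ts.foldl (fun b t => if b < t then t else b) b

def valA (v : List String) : List String :=
  [(PySem.List.pyGet? (PySem.List.sorted v (fun x => x) false) 0).getD "",
   (PySem.List.pyGet? (PySem.List.sorted v (fun x => x) false) (-1)).getD ""]

-- step of A's first loop collapses to an unconditional modify
theorem stepA_collapse (d : PySem.Dict String (List String)) (u : String)
    (f : List String → List String) :
    (if d.contains u then d.modify u [] f else (d.insert u []).modify u [] f)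
      = d.modify u [] f := by
  by_cases h : d.contains u
  · simp [h]
  · simp only [h]
    show (d.insert u []).insert u (f ((d.insert u []).getD u []))
        = d.insert u (f (d.getD u []))
    rw [PySem.Dict.getD_insert_self, PySem.Dict.insert_insert_self,
        PySem.Dict.getD_of_not_contains (h := by simpa using h)]

theorem runMin_eq_foldl_min (ts : List String) (a : String) : runMin ts a = ts.foldl min a := by
  unfold runMin
  congr 1
  funext x y
  by_cases h : y < x
  · rw [if_pos h, min_eq_right h.le]
  · rw [if_neg h, min_eq_left (not_lt.mp h)]

theorem runMax_eq_foldl_max (ts : List String) (b : String) : runMax ts b = ts.foldl max b := by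
  unfold runMax
  congr 1
  funext x y
  by_cases h : x < y
  · rw [if_pos h, max_eq_right h.le]
  · rw [if_neg h, max_eq_left (not_lt.mp h)]

-- min/max of a nonempty list as first/last of its sorted version
theorem valA_eq (t : String) (ts : List String) :
    valA (t :: ts) = [runMin ts t, runMax ts t] := by
  rw [runMin_eq_foldl_min, runMax_eq_foldl_max]
  unfold valA
  have hvne : (t :: ts) ≠ ([] : List String) := by simp
  obtain ⟨m, tl, hs⟩ : ∃ m tl,
      PySem.List.sorted (t :: ts) (fun x => x) false = m :: tl := by
    cases hsv : PySem.List.sorted (t :: ts) (fun x => x) false with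
    | nil => exact absurd ((PySem.List.sorted_eq_nil_iff _ _ _).mp hsv) hvne
    | cons m tl => exact ⟨m, tl, rfl⟩
  have hmin? : PySem.List.min? (t :: ts) (fun y => y) = some (ts.foldl min t) :=
    PySem.List.min?_id_cons t ts
  have hmax? : PySem.List.max? (t :: ts) (fun y => y) = some (ts.foldl max t) :=
    PySem.List.max?_id_cons t ts
  -- head = foldl min
  have hm_mem : m ∈ (t :: ts) := by
    have : m ∈ PySem.List.sorted (t :: ts) (fun x => x) false := by
      rw [hs]; exact List.mem_cons_self
    exact (PySem.List.mem_sorted _ _ _ _).mp this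
  have hm_le : ∀ y ∈ (t :: ts), m ≤ y := fun y hy => PySem.List.key_head_sorted_le _ _ hs y hy
  have hmin_mem : ts.foldl min t ∈ (t :: ts) := PySem.List.min?_mem hmin?
  have hmin_isMin : ∀ y ∈ (t :: ts), ts.foldl min t ≤ y := PySem.List.min?_isMin hmin?
  have hhead : m = ts.foldl min t :=
    le_antisymm (hm_le _ hmin_mem) (hmin_isMin _ hm_mem)
  -- last = foldl max
  have hsne : PySem.List.sorted (t :: ts) (fun x => x) false ≠ [] := by
    rw [hs]; exact List.cons_ne_nil m tl
  have hlast? : (PySem.List.sorted (t :: ts) (fun x => x) false).getLast? =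
      some ((PySem.List.sorted (t :: ts) (fun x => x) false).getLast hsne) :=
    List.getLast?_eq_some_getLast hsne
  have hlast_mem : (PySem.List.sorted (t :: ts) (fun x => x) false).getLast hsne ∈ (t :: ts) :=
    (PySem.List.mem_sorted _ _ _ _).mp (List.getLast_mem hsne)
  have hlast_ge : ∀ y ∈ (t :: ts),
      y ≤ (PySem.List.sorted (t :: ts) (fun x => x) false).getLast hsne := by
    intro y hy
    have hy' : y ∈ PySem.List.sorted (t :: ts) (fun x => x) false :=
      (PySem.List.mem_sorted _ _ _ _).mpr hy
    obtain ⟨i, hi, rfl⟩ := List.mem_iff_getElem.mp hy'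
    rw [List.getLast_eq_getElem]
    have hq : (PySem.List.sorted (t :: ts) (fun x => x) false).length - 1
        < (PySem.List.sorted (t :: ts) (fun x => x) false).length := by
      have : 0 < (PySem.List.sorted (t :: ts) (fun x => x) false).length :=
        List.length_pos_of_ne_nil hsne
      omega
    have hp := PySem.List.sorted_pairwise (t :: ts) (fun x => x)
    rw [List.pairwise_iff_getElem] at hp
    rcases Nat.lt_or_ge i ((PySem.List.sorted (t :: ts) (fun x => x) false).length - 1) with hlt | hge
    · exact hp i _ hi hq hlt
    · have : i = (PySem.List.sorted (t :: ts) (fun x => x) false).length - 1 := by omega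
      subst this; exact le_refl _
  have hmax_mem : ts.foldl max t ∈ (t :: ts) := PySem.List.max?_mem hmax?
  have hmax_isMax : ∀ y ∈ (t :: ts), y ≤ ts.foldl max t := PySem.List.max?_isMax hmax?
  have hlast : (PySem.List.sorted (t :: ts) (fun x => x) false).getLast hsne
      = ts.foldl max t :=
    le_antisymm (hmax_isMax _ hlast_mem) (hlast_ge _ hmax_mem)
  rw [PySem.List.pyGet?_neg_one, hlast?, hlast, hs, PySem.List.pyGet?_zero_cons, hhead]
  rfl

-- generic insert-loop lemmas
theorem foldl_insert_getD_not_mem (w : String × List String → List String)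
    (L : List (String × List String)) (d : PySem.Dict String (List String)) (u : String)
    (h : u ∉ L.map Prod.fst) :
    (L.foldl (fun d' kv => d'.insert kv.1 (w kv)) d).getD u [] = d.getD u [] := by
  induction L generalizing d with
  | nil => rfl
  | cons kv rest ih =>
      simp only [List.map_cons, List.mem_cons] at h
      push Not at h
      simp only [List.foldl_cons]
      rw [ih _ h.2, PySem.Dict.getD_insert, if_neg h.1]

theorem foldl_insert_getD_mem (w : String × List String → List String)
    (L : List (String × List String)) (d : PySem.Dict String (List String))
    (u : String) (v : List String)
    (hnd : (L.map Prod.fst).Nodup) (hm : (u, v) ∈ L) :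
    (L.foldl (fun d' kv => d'.insert kv.1 (w kv)) d).getD u [] = w (u, v) := by
  induction L generalizing d with
  | nil => cases hm
  | cons kv rest ih =>
      simp only [List.map_cons, List.nodup_cons] at hnd
      rcases List.mem_cons.mp hm with h | h
      · subst h
        simp only [List.foldl_cons]
        rw [foldl_insert_getD_not_mem w rest _ u hnd.1, PySem.Dict.getD_insert_self]
      · simp only [List.foldl_cons]
        exact ih _ hnd.2 h

-- B's loop: value at u when u already bound to [mn, mx]
theorem Bfold_get_some (l : List (String × String)) :
    ∀ (d : PySem.Dict String (List String)) (u mn mx : String),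
    d.get? u = some [mn, mx] →
    (l.foldl stepB d).get? u = some [runMin (tsOf u l) mn, runMax (tsOf u l) mx] := by
  induction l with
  | nil => intro d u mn mx h; simpa [tsOf, runMin, runMax]
  | cons p rest ih =>
      intro d u mn mx h
      by_cases hk : p.1 = u
      · have hc : d.contains u = true := by
          rw [PySem.Dict.contains_eq_isSome_get?, h]; rfl
        have hg : d.getD u [] = [mn, mx] := by rw [PySem.Dict.getD_eq_get?_getD, h]; rfl
        have hstep : stepB d p
            = d.insert u [if p.2 < mn then p.2 else mn, if mx < p.2 then p.2 else mx] := by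
          simp [stepB, bval, hk, hc, hg]
        have hts : tsOf u (p :: rest) = p.2 :: tsOf u rest := by
          simp [tsOf, hk]
        simp only [List.foldl_cons, hstep, hts]
        exact ih _ u _ _ (PySem.Dict.get?_insert_self _ _ _)
      · have hts : tsOf u (p :: rest) = tsOf u rest := by
          simp [tsOf, hk]
        simp only [List.foldl_cons, hts]
        exact ih _ u mn mx (by rw [stepB, PySem.Dict.get?_insert, if_neg (fun e => hk e.symm)]; exact h)

-- B's loop: value at u when u unbound
theorem Bfold_get_none (l : List (String × String)) :
    ∀ (d : PySem.Dict String (List String)) (u : String),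
    d.get? u = none →
    (l.foldl stepB d).get? u
      = (match tsOf u l with
         | [] => none
         | t :: ts => some [runMin ts t, runMax ts t]) := by
  induction l with
  | nil => intro d u h; simpa [tsOf]
  | cons p rest ih =>
      intro d u h
      by_cases hk : p.1 = u
      · have hc : d.contains u = false := by
          rw [PySem.Dict.contains_eq_isSome_get?, h]; rfl
        have hstep : stepB d p = d.insert u [p.2, p.2] := by
          simp [stepB, bval, hk, hc]
        have hts : tsOf u (p :: rest) = p.2 :: tsOf u rest := by
          simp [tsOf, hk]
        simp only [List.foldl_cons, hstep, hts]
        exact Bfold_get_some rest _ u p.2 p.2 (PySem.Dict.get?_insert_self _ _ _)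
      · have hts : tsOf u (p :: rest) = tsOf u rest := by
          simp [tsOf, hk]
        simp only [List.foldl_cons, hts]
        exact ih _ u (by rw [stepB, PySem.Dict.get?_insert, if_neg (fun e => hk e.symm)]; exact h)

theorem set_update_self (s : List String) : PySem.Set.update s s = s := by
  simp [PySem.Set.update_eq_append_filter]

-- A's first loop and B's loop, as folds of stepA / stepB over the (user, ts) pairs
def dApre (logs : List (List String)) : PySem.Dict String (List String) :=
  (logs.map pvPair).foldl stepA PySem.Dict.empty

def dB (logs : List (List String)) : PySem.Dict String (List String) :=
  (logs.map pvPair).foldl stepB PySem.Dict.empty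

def d2 (logs : List (List String)) : PySem.Dict String (List String) :=
  (dApre logs).items.foldl (fun d' kv => d'.insert kv.1 (valA kv.2)) (dApre logs)

theorem IndeedA_eq (logs : List (List String)) :
    Indeed logs = PySem.List.sorted (d2 logs).items (fun x => x.1) false := by
  unfold Indeed d2 dApre
  rw [List.foldl_map]
  have h : (fun (d : PySem.Dict String (List String)) (lst : List String) =>
      let user := (PySem.List.pyGet? lst 1).getD ""
      let ts := (PySem.List.pyGet? lst 0).getD ""
      if d.contains user then
        d.modify user [] (fun v => v ++ [ts])
      else
        (d.insert user []).modify user [] (fun v => v ++ [ts]))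
      = (fun d lst => stepA d (pvPair lst)) := by
    funext d lst
    exact stepA_collapse d ((PySem.List.pyGet? lst 1).getD "")
      (fun v => v ++ [(PySem.List.pyGet? lst 0).getD ""])
  rw [h]
  rfl

theorem IndeedB_eq (logs : List (List String)) :
    Indeed_alt logs = PySem.List.sorted (dB logs).items (fun kv => kv.1) false := by
  unfold Indeed_alt dB
  rw [List.foldl_map]
  have h : (fun (d : PySem.Dict String (List String)) (lst : List String) =>
      let ts := (PySem.List.pyGet? lst 0).getD ""
      let user := (PySem.List.pyGet? lst 1).getD ""
      if d.contains user then
        let cur := d.getD user []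
        let mn := (PySem.List.pyGet? cur 0).getD ""
        let mx := (PySem.List.pyGet? cur 1).getD ""
        d.insert user [if ts < mn then ts else mn, if mx < ts then ts else mx]
      else
        d.insert user [ts, ts])
      = (fun d lst => stepB d (pvPair lst)) := by
    funext d lst
    by_cases hc : d.contains ((PySem.List.pyGet? lst 1).getD "") <;>
      simp [stepB, bval, pvPair, hc]
  rw [h]

-- keys and values of the three dictionaries
theorem keys_dApre (logs : List (List String)) :
    (dApre logs).keys = PySem.Set.ofList ((logs.map pvPair).map Prod.fst) := by
  have h0 : dApre logs = (logs.map pvPair).foldl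
      (fun d x => d.insert x.1 (d.getD x.1 [] ++ [x.2])) PySem.Dict.empty := rfl
  rw [h0, PySem.Dict.keys_foldl_insert_key, PySem.Dict.keys_empty,
      PySem.Set.update_nil_left]

theorem nodup_keys_dApre (logs : List (List String)) : (dApre logs).keys.Nodup := by
  have h0 : dApre logs = (logs.map pvPair).foldl
      (fun d x => d.insert x.1 (d.getD x.1 [] ++ [x.2])) PySem.Dict.empty := rfl
  rw [h0]
  exact PySem.Dict.nodup_keys_foldl_insert_key _ _ _ _ PySem.Dict.nodup_keys_empty

theorem keys_dB (logs : List (List String)) :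
    (dB logs).keys = PySem.Set.ofList ((logs.map pvPair).map Prod.fst) := by
  have h0 : dB logs = (logs.map pvPair).foldl
      (fun d x => d.insert x.1 (bval d x)) PySem.Dict.empty := rfl
  rw [h0, PySem.Dict.keys_foldl_insert_key, PySem.Dict.keys_empty, PySem.Set.update_nil_left]

theorem nodup_keys_dB (logs : List (List String)) : (dB logs).keys.Nodup := by
  have h0 : dB logs = (logs.map pvPair).foldl
      (fun d x => d.insert x.1 (bval d x)) PySem.Dict.empty := rfl
  rw [h0]
  exact PySem.Dict.nodup_keys_foldl_insert_key _ _ _ _ PySem.Dict.nodup_keys_empty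

theorem keys_d2 (logs : List (List String)) : (d2 logs).keys = (dApre logs).keys := by
  unfold d2
  rw [PySem.Dict.keys_foldl_insert_key]
  have h : (dApre logs).items.map Prod.fst = (dApre logs).keys := rfl
  rw [h, set_update_self]

theorem getD_dApre (logs : List (List String)) (u : String) :
    (dApre logs).getD u [] = tsOf u (logs.map pvPair) := by
  have h0 : dApre logs = (logs.map pvPair).foldl
      (fun d p => d.modify p.1 [] (fun v => v ++ [p.2])) PySem.Dict.empty := rfl
  rw [h0, PySem.Dict.getD_foldl_modify_append, PySem.Dict.getD_empty]
  rfl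

theorem get?_dApre (logs : List (List String)) (u : String)
    (hm : u ∈ (dApre logs).keys) :
    (dApre logs).get? u = some (tsOf u (logs.map pvPair)) := by
  cases hg : (dApre logs).get? u with
  | none =>
      rw [PySem.Dict.get?_eq_none_iff_not_mem_keys] at hg
      exact absurd hm hg
  | some w =>
      have : (dApre logs).getD u [] = w := by
        rw [PySem.Dict.getD_eq_get?_getD, hg]; rfl
      rw [getD_dApre] at this
      rw [← this]

theorem getD_d2 (logs : List (List String)) (u : String) (hm : u ∈ (dApre logs).keys) :
    (d2 logs).getD u [] = valA (tsOf u (logs.map pvPair)) := by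
  have hitem : (u, tsOf u (logs.map pvPair)) ∈ (dApre logs).items :=
    PySem.Dict.mem_items_of_get?_eq_some _ (get?_dApre logs u hm)
  have hnd : ((dApre logs).items.map Prod.fst).Nodup := nodup_keys_dApre logs
  exact foldl_insert_getD_mem (fun kv => valA kv.2) _ _ _ _ hnd hitem

theorem tsOf_ne_nil (logs : List (List String)) (u : String)
    (hk : u ∈ (logs.map pvPair).map Prod.fst) : tsOf u (logs.map pvPair) ≠ [] := by
  obtain ⟨p, hp, rfl⟩ := List.mem_map.mp hk
  have hf : p ∈ (logs.map pvPair).filter (fun q => q.1 == p.1) :=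
    List.mem_filter.mpr ⟨hp, by simp⟩
  intro hnil
  unfold tsOf at hnil
  rw [List.map_eq_nil_iff] at hnil
  rw [hnil] at hf
  cases hf

theorem items_d2_eq_items_dB (logs : List (List String)) :
    (d2 logs).items = (dB logs).items := by
  have hn2 : (d2 logs).keys.Nodup := by rw [keys_d2]; exact nodup_keys_dApre logs
  rw [PySem.Dict.items_eq_map_keys _ hn2 [], PySem.Dict.items_eq_map_keys _ (nodup_keys_dB logs) [],
      keys_d2, keys_dApre, keys_dB]
  apply List.map_congr_left
  intro k hk
  have hk' : k ∈ (logs.map pvPair).map Prod.fst := by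
    have := PySem.Set.mem_ofList (xs := (logs.map pvPair).map Prod.fst) (y := k)
    exact this.mp hk
  have hkeys : k ∈ (dApre logs).keys := by rw [keys_dApre]; exact hk
  cases hts : tsOf k (logs.map pvPair) with
  | nil => exact absurd hts (tsOf_ne_nil logs k hk')
  | cons t ts =>
      have h2 : (d2 logs).getD k [] = [runMin ts t, runMax ts t] := by
        rw [getD_d2 logs k hkeys, hts, valA_eq]
      have hbn : (dB logs).get? k = some [runMin ts t, runMax ts t] := by
        unfold dB
        rw [Bfold_get_none _ _ _ (PySem.Dict.get?_empty _), hts]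
      have hb : (dB logs).getD k [] = [runMin ts t, runMax ts t] := by
        rw [PySem.Dict.getD_eq_get?_getD, hbn]; rfl
      rw [h2, hb]

-- ===== VERDICT (by name: the statement is the Claim_ definition above) =====
theorem Indeed_spec : Claim_equal_Indeed := by
  intro logs _ _
  unfold Spec_Indeed
  rw [IndeedA_eq, IndeedB_eq, items_d2_eq_items_dB]
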